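-- pv_equiv track=rewrite | github.com/LDYWINNER/PycharmProjects | 20WinLab8/Lab8.py | destination
-- ===== SOURCE A (Python) =====
-- def destination(max_distance, places):
--     if max_distance <= 0:
--         return None
--     temp = []
--     for distance in places.values():
--         if distance <= max_distance:
--             temp.append(distance)
--
--     if len(temp) == 0:
--         return 'nowhere'
--     else:
--         for item in places.items():
--             if item[1] == biggest(temp):
--                 return item[0]
--
-- def biggest(list):
--     big = list[0]
--     for x in list:
--         if x > big:
--             big = x
--     return big
-- ===== SOURCE B (Python) =====
-- def destination(max_distance, places):
--     if max_distance <= 0: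
--         return None
--     best_key = None
--     best_dist = 0
--     for key, dist in places.items():
--         if dist <= max_distance and (best_key is None or dist > best_dist):
--             best_key, best_dist = key, dist
--     return 'nowhere' if best_key is None else best_key
-- ===== Notes on version B (the rewrite author's own statement) =====
-- stated objective: simpler
-- what changed: Single pass tracking the argmax (best_key, best_dist) directly, instead of building a temp list of eligible distances, recomputing its maximum with biggest() inside the final scan, and re-finding the key by value equality.
import Mathlib
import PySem

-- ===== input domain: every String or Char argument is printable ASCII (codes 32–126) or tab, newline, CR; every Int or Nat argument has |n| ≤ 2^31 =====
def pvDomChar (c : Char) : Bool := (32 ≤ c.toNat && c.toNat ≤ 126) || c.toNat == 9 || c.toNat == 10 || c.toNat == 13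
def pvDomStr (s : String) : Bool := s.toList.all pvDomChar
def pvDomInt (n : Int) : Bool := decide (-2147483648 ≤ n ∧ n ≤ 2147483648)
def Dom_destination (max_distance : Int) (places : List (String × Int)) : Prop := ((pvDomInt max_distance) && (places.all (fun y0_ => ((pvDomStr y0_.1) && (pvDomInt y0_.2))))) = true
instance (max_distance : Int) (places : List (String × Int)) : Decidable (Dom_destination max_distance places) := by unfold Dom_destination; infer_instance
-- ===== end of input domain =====

-- B replaces A's temp list + repeated biggest() max pass + value-equality key re-lookup
-- by one pass over the items tracking the argmax directly (simpler decomposition).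

-- ===== PORT A =====
-- biggest(list): big = list[0] (IndexError on [] → none; only called with nonempty temp), then max loop
def biggestP (l : List Int) : Option Int :=
  match PySem.List.pyGet? l 0 with
  | none => none
  | some big => some (l.foldl (fun big x => if x > big then x else big) big)

-- the final 'for item in places.items(): if item[1] == biggest(temp): return item[0]' loop
-- (biggest(temp) recomputed each iteration, as in A); falling off the end returns None
def findP (temp : List Int) : List (String × Int) → Option String
  | [] => none
  | (k, v) :: rest => if biggestP temp = some v then some k else findP temp rest

def destination (max_distance : Int) (places : List (String × Int)) : Option String :=
  if max_distance ≤ 0 then none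
  else
    let temp := places.foldl (fun t p => if p.2 ≤ max_distance then t ++ [p.2] else t) []
    if temp.length = 0 then some "nowhere"
    else findP temp places

-- ===== PORT B =====
def destStep (max_distance : Int) (st : Option String × Int) (p : String × Int) :
    Option String × Int :=
  if p.2 ≤ max_distance ∧ (st.1 = none ∨ p.2 > st.2) then (some p.1, p.2) else st

def destination_alt (max_distance : Int) (places : List (String × Int)) : Option String :=
  if max_distance ≤ 0 then none
  else
    match (places.foldl (destStep max_distance) (none, 0)).1 with
    | none => some "nowhere"
    | some k => some k

-- ===== PRECONDITION & SPEC =====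
def Spec_destination (max_distance : Int) (places : List (String × Int)) (out : Option String) : Prop := out = destination_alt max_distance places
instance (max_distance : Int) (places : List (String × Int)) (out : Option String) : Decidable (Spec_destination max_distance places out) := by unfold Spec_destination; infer_instance

-- ===== CLAIM (what is proved, stated in full; the proofs are below) =====
def Claim_equal_destination : Prop := ∀ (max_distance : Int) (places : List (String × Int)), Dom_destination max_distance places → Spec_destination max_distance places (destination max_distance places)

-- ===== LEMMAS AND PROOFS =====

-- first-argmax (ties kept left) of the eligible items, right recursion; reference for both sides
def fm (md : Int) : List (String × Int) → Option (String × Int)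
  | [] => none
  | (k, v) :: rest =>
    if v ≤ md then
      match fm md rest with
      | some (k', v') => if v' > v then some (k', v') else some (k, v)
      | none => some (k, v)
    else fm md rest

theorem fm_none {md : Int} {l : List (String × Int)} (h : fm md l = none) :
    ∀ p ∈ l, ¬ p.2 ≤ md := by
  induction l with
  | nil => intro p hp; simp at hp
  | cons a rest ih =>
    obtain ⟨k, v⟩ := a
    intro p hp
    by_cases hv : v ≤ md
    · simp only [fm, if_pos hv] at h
      cases hfm : fm md rest with
      | none => simp [hfm] at h
      | some q => obtain ⟨k', v'⟩ := q; simp [hfm] at h; split_ifs at h <;> simp at h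
    · simp only [fm, if_neg hv] at h
      rcases List.mem_cons.mp hp with h1 | h2
      · subst h1; exact hv
      · exact ih h p h2

theorem fm_some {md : Int} {l : List (String × Int)} {k : String} {v : Int}
    (h : fm md l = some (k, v)) :
    (k, v) ∈ l ∧ v ≤ md ∧ ∀ p ∈ l, p.2 ≤ md → p.2 ≤ v := by
  induction l generalizing k v with
  | nil => simp [fm] at h
  | cons a rest ih =>
    obtain ⟨k1, v1⟩ := a
    by_cases hv : v1 ≤ md
    · simp only [fm, if_pos hv] at h
      cases hfm : fm md rest with
      | none =>
        simp [hfm] at h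
        obtain ⟨hk, hvv⟩ := h; subst hk; subst hvv
        refine ⟨List.mem_cons_self .., hv, ?_⟩
        intro p hp hple
        rcases List.mem_cons.mp hp with h1 | h2
        · subst h1; rfl
        · exact absurd hple (fm_none hfm p h2)
      | some q =>
        obtain ⟨k', v'⟩ := q
        obtain ⟨hm, hle, hmax⟩ := ih hfm
        simp only [hfm] at h
        split_ifs at h with hgt
        · simp at h; obtain ⟨hk, hvv⟩ := h; subst hk; subst hvv
          refine ⟨List.mem_cons_of_mem _ hm, hle, ?_⟩
          intro p hp hple
          rcases List.mem_cons.mp hp with h1 | h2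
          · subst h1; omega
          · exact hmax p h2 hple
        · simp at h; obtain ⟨hk, hvv⟩ := h; subst hk; subst hvv
          refine ⟨List.mem_cons_self .., hv, ?_⟩
          intro p hp hple
          rcases List.mem_cons.mp hp with h1 | h2
          · subst h1; rfl
          · have := hmax p h2 hple; omega
    · simp only [fm, if_neg hv] at h
      obtain ⟨hm, hle, hmax⟩ := ih h
      refine ⟨List.mem_cons_of_mem _ hm, hle, ?_⟩
      intro p hp hple
      rcases List.mem_cons.mp hp with h1 | h2
      · subst h1; exact absurd hple hv
      · exact hmax p h2 hple

-- B's fold from an already-set state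
theorem foldB_some (md : Int) (l : List (String × Int)) :
    ∀ (k : String) (d : Int),
      l.foldl (destStep md) (some k, d) =
        match fm md l with
        | some (k', v') => if v' > d then (some k', v') else (some k, d)
        | none => (some k, d) := by
  induction l with
  | nil => intro k d; simp [fm]
  | cons a rest ih =>
    obtain ⟨k1, v1⟩ := a
    intro k d
    by_cases hstep : v1 ≤ md ∧ v1 > d
    · have hup : destStep md (some k, d) (k1, v1) = (some k1, v1) := by
        simp only [destStep]; rw [if_pos ⟨hstep.1, Or.inr hstep.2⟩]
      simp only [List.foldl_cons, hup, ih, fm, if_pos hstep.1]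
      cases hfm : fm md rest with
      | none => simp [hstep.2]
      | some q =>
        obtain ⟨k', v'⟩ := q
        by_cases hgt : v' > v1
        · simp [hgt, show d < v' by omega]
        · simp [hgt, hstep.2]
    · have hkeep : destStep md (some k, d) (k1, v1) = (some k, d) := by
        simp only [destStep]
        rw [if_neg]; simp; omega
      simp only [List.foldl_cons, hkeep, ih]
      by_cases hv : v1 ≤ md
      · have hle : v1 ≤ d := by omega
        simp only [fm, if_pos hv]
        cases hfm : fm md rest with
        | none => simp [show ¬ d < v1 by omega]
        | some q =>
          obtain ⟨k', v'⟩ := q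
          by_cases hgt : v' > v1
          · simp [hgt]
          · simp [hgt, show ¬ d < v1 by omega, show ¬ d < v' by omega]
      · simp only [fm, if_neg hv]

theorem foldB_none (md : Int) (l : List (String × Int)) :
    l.foldl (destStep md) (none, 0) =
      match fm md l with
      | some (k', v') => (some k', v')
      | none => ((none : Option String), (0 : Int)) := by
  induction l with
  | nil => simp [fm]
  | cons a rest ih =>
    obtain ⟨k1, v1⟩ := a
    by_cases hv : v1 ≤ md
    · simp only [List.foldl_cons, destStep, hv, true_and]
      rw [if_pos (by simp)]
      rw [foldB_some]
      simp only [fm, if_pos hv]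
      cases hfm : fm md rest with
      | none => simp
      | some q =>
        obtain ⟨k', v'⟩ := q
        by_cases hgt : v' > v1
        · simp [hgt]
        · simp [hgt]
    · simp only [List.foldl_cons, destStep, hv]
      rw [if_neg (by simp [hv])]
      simp only [fm, if_neg hv, ih]

-- the temp accumulator is the eligible values, in order
theorem temp_eq (md : Int) (l : List (String × Int)) :
    ∀ acc : List Int,
      l.foldl (fun t p => if p.2 ≤ md then t ++ [p.2] else t) acc =
        acc ++ (l.filter (fun p => p.2 ≤ md)).map Prod.snd := by
  induction l with
  | nil => intro acc; simp
  | cons a rest ih =>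
    intro acc
    by_cases hv : a.2 ≤ md
    · simp [hv, ih]
    · simp [hv, ih]

-- biggest returns a member that bounds the list
theorem foldl_max_mem (l : List Int) :
    ∀ b : Int,
      b ≤ l.foldl (fun big x => if x > big then x else big) b ∧
      (∀ x ∈ l, x ≤ l.foldl (fun big x => if x > big then x else big) b) ∧
      (l.foldl (fun big x => if x > big then x else big) b = b ∨
        l.foldl (fun big x => if x > big then x else big) b ∈ l) := by
  induction l with
  | nil => intro b; simp
  | cons a rest ih =>
    intro b
    simp only [List.foldl_cons]
    by_cases hgt : a > b
    · rw [if_pos hgt]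
      obtain ⟨h1, h2, h3⟩ := ih a
      refine ⟨by omega, ?_, ?_⟩
      · intro x hx
        rcases List.mem_cons.mp hx with h | h
        · subst h; exact h1
        · exact h2 x h
      · rcases h3 with h | h
        · right; rw [h]; exact List.mem_cons_self ..
        · right; exact List.mem_cons_of_mem _ h
    · rw [if_neg hgt]
      obtain ⟨h1, h2, h3⟩ := ih b
      refine ⟨h1, ?_, ?_⟩
      · intro x hx
        rcases List.mem_cons.mp hx with h | h
        · subst h; omega
        · exact h2 x h
      · rcases h3 with h | h
        · left; exact h
        · right; exact List.mem_cons_of_mem _ h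
    
theorem biggest_spec {l : List Int} (h : l ≠ []) :
    ∃ M, biggestP l = some M ∧ M ∈ l ∧ ∀ x ∈ l, x ≤ M := by
  cases l with
  | nil => exact absurd rfl h
  | cons a rest =>
    obtain ⟨h1, h2, h3⟩ := foldl_max_mem (a :: rest) a
    refine ⟨_, ?_, ?_, h2⟩
    · simp [biggestP, PySem.List.pyGet?, PySem.List.pyIdx?]
    · rcases h3 with h | h
      · rw [h]; exact List.mem_cons_self ..
      · exact h

-- A's find loop, when biggest temp = some M is the max eligible value and M ≤ md,
-- returns the first-argmax key
theorem findP_eq (md : Int) (temp : List Int) (M : Int) (hb : biggestP temp = some M)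
    (hM : M ≤ md) :
    ∀ l : List (String × Int), (∀ p ∈ l, p.2 ≤ md → p.2 ≤ M) →
      findP temp l =
        match fm md l with
        | some (k', v') => if v' = M then some k' else none
        | none => none := by
  intro l
  induction l with
  | nil => intro _; simp [findP, fm]
  | cons a rest ih =>
    obtain ⟨k1, v1⟩ := a
    intro hbound
    have hbrest : ∀ p ∈ rest, p.2 ≤ md → p.2 ≤ M := fun p hp => hbound p (List.mem_cons_of_mem _ hp)
    by_cases heq : v1 = M
    · subst heq
      have hfml : fm md ((k1, v1) :: rest) = some (k1, v1) := by
        simp only [fm, if_pos hM]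
        cases hfm : fm md rest with
        | none => rfl
        | some q =>
          obtain ⟨k', v'⟩ := q
          obtain ⟨hm, hle, _⟩ := fm_some hfm
          have : v' ≤ v1 := hbrest _ hm hle
          simp; omega
      rw [hfml]
      simp [findP, hb]
    · have hfind : findP temp ((k1, v1) :: rest) = findP temp rest := by
        simp [findP, hb]; omega
      rw [hfind, ih hbrest]
      by_cases hv : v1 ≤ md
      · have hv1M : v1 ≤ M := hbound _ (List.mem_cons_self ..) hv
        simp only [fm, if_pos hv]
        cases hfm : fm md rest with
        | none => simp [heq]
        | some q =>
          obtain ⟨k', v'⟩ := q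
          by_cases hgt : v' > v1
          · simp [hgt]
          · obtain ⟨hm, hle, _⟩ := fm_some hfm
            have hne : v' ≠ M := by omega
            simp [hgt, hne, heq]
      · simp only [fm, if_neg hv]

-- ===== VERDICT (by name: the statement is the Claim_ definition above) =====
theorem destination_spec : Claim_equal_destination := by
  intro md places _
  unfold Spec_destination destination destination_alt
  by_cases hmd : md ≤ 0
  · simp [hmd]
  · simp only [if_neg hmd]
    rw [temp_eq md places [], List.nil_append, foldB_none]
    cases hfm : fm md places with
    | none =>
      have hfilter : places.filter (fun p => decide (p.2 ≤ md)) = [] := by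
        rw [List.filter_eq_nil_iff]
        intro p hp
        simpa using fm_none hfm p hp
      simp [hfilter]
    | some q =>
      obtain ⟨k, v⟩ := q
      obtain ⟨hm, hle, hmax⟩ := fm_some hfm
      have hvtemp : v ∈ (places.filter (fun p => decide (p.2 ≤ md))).map Prod.snd := by
        exact List.mem_map.mpr ⟨(k, v), List.mem_filter.mpr ⟨hm, by simpa using hle⟩, rfl⟩
      have hne : (places.filter (fun p => decide (p.2 ≤ md))).map Prod.snd ≠ [] := by
        intro h; rw [h] at hvtemp; simp at hvtemp
      obtain ⟨M, hb, hMmem, hMmax⟩ := biggest_spec hne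
      have hMv : M = v := by
        obtain ⟨p, hp, hpv⟩ := List.mem_map.mp hMmem
        have hpf := List.mem_filter.mp hp
        have h1 : M ≤ v := by
          subst hpv; exact hmax p hpf.1 (by simpa using hpf.2)
        have h2 : v ≤ M := hMmax v hvtemp
        omega
      subst hMv
      rw [if_neg (by simpa using hne)]
      rw [findP_eq md _ M hb hle places hmax, hfm]
      simp
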